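-- pv_equiv track=rewrite | github.com/envomp/2018-Introduction-to-Programming | ktj1/exam.py | has_seven
-- ===== SOURCE A (Python) =====
-- def has_seven(nums):
--     """
--     Given a list if ints, return True if the value 7 appears in the list exactly 3 times and no consecutive elements have the same value.
--
--     has_seven([1, 2, 3]) => False
--     has_seven([7, 1, 7, 7]) => False
--     has_seven([7, 1, 7, 1, 7]) => True
--     has_seven([7, 1, 7, 1, 1, 7]) => False
--     """
--     if nums.count(7) == 3:
--         for i in range(len(nums) - 1):
--             if nums[i] == nums[i + 1]:
--                 return False
--         else:
--             return True
--     else: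
--         return False
-- ===== SOURCE B (Python) =====
-- def has_seven(nums):
--     sevens = 0
--     prev = None
--     for x in nums:
--         if prev is not None and x == prev:
--             return False
--         if x == 7:
--             sevens += 1
--         prev = x
--     return sevens == 3
-- ===== Notes on version B (the rewrite author's own statement) =====
-- stated objective: alternative
-- what changed: B fuses A's separate count(7) pass and adjacency index scan into a single pass maintaining a running 7-count and the previous element, with early False on an adjacent equal pair.
import Mathlib
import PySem

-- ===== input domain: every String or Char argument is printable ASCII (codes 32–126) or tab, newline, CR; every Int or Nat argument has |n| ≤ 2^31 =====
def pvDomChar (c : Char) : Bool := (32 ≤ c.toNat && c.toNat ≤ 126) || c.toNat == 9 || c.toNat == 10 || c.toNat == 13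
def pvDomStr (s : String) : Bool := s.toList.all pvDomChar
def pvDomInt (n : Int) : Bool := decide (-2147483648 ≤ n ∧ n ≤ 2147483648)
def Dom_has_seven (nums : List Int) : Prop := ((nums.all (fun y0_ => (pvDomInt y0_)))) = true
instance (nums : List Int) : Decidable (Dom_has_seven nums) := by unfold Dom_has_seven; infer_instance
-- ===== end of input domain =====

-- B fuses A's separate count pass and adjacency scan into one pass (alternative decomposition, same cost).

-- ===== PORT A =====
-- A's `for i in range(len(nums) - 1): if nums[i] == nums[i+1]: return False` scan
def hasSevenScan (nums : List Int) (i : Nat) : Bool :=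
  if _h : i + 1 < nums.length then
    if nums[i]! == nums[i + 1]! then false
    else hasSevenScan nums (i + 1)
  else true
termination_by nums.length - i

def has_seven (nums : List Int) : Bool :=
  if PySem.List.count nums 7 == 3 then hasSevenScan nums 0
  else false

-- ===== PORT B =====
-- B's single loop: running count of 7s, previous element; early False on adjacent equal pair
def hasSevenAltLoop (xs : List Int) (sevens : Int) (prev : Option Int) : Bool :=
  match xs with
  | [] => sevens == 3
  | x :: t =>
    if prev == some x then false
    else hasSevenAltLoop t (if x == 7 then sevens + 1 else sevens) (some x)

def has_seven_alt (nums : List Int) : Bool :=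
  hasSevenAltLoop nums 0 none

-- ===== PRECONDITION & SPEC =====
def Spec_has_seven (nums : List Int) (out : Bool) : Prop := out = has_seven_alt nums
instance (nums : List Int) (out : Bool) : Decidable (Spec_has_seven nums out) := by unfold Spec_has_seven; infer_instance

-- ===== CLAIM (what is proved, stated in full; the proofs are below) =====
def Claim_equal_has_seven : Prop := ∀ (nums : List Int), Dom_has_seven nums → Spec_has_seven nums (has_seven nums)

-- ===== LEMMAS AND PROOFS =====

-- common reference form: adjacent-distinct check
def noAdj : List Int → Bool
  | x :: y :: t => if x == y then false else noAdj (y :: t)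
  | _ => true

theorem hasSevenScan_eq_noAdj (nums : List Int) :
    hasSevenScan nums 0 = noAdj nums := by
  suffices h : ∀ (l : List Int) (i : Nat) (pre : List Int), pre.length = i →
      hasSevenScan (pre ++ l) i = noAdj l by
    simpa using h nums 0 [] rfl
  intro l
  induction l with
  | nil =>
    intro i pre hpre
    unfold hasSevenScan
    rw [dif_neg (by simp [hpre])]
    rfl
  | cons a t ih =>
    intro i pre hpre
    cases t with
    | nil =>
      unfold hasSevenScan
      rw [dif_neg (by simp [hpre])]
      rfl
    | cons b t2 =>
      have hlen : i + 1 < (pre ++ a :: b :: t2).length := by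
        simp only [List.length_append, List.length_cons, hpre]
        omega
      have h1 : (pre ++ a :: b :: t2)[i]! = a := by
        have hi : i < (pre ++ a :: b :: t2).length := by omega
        rw [getElem!_pos (pre ++ a :: b :: t2) i hi]
        rw [List.getElem_append_right (by omega)]
        simp [hpre]
      have h2 : (pre ++ a :: b :: t2)[i + 1]! = b := by
        rw [getElem!_pos (pre ++ a :: b :: t2) (i + 1) hlen]
        rw [List.getElem_append_right (by omega)]
        have : i + 1 - pre.length = 1 := by omega
        simp [this]
      unfold hasSevenScan
      rw [dif_pos hlen, h1, h2]
      by_cases hab : a = b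
      · simp [hab, noAdj]
      · have hrec := ih (i + 1) (pre ++ [a]) (by simp [hpre])
        rw [List.append_assoc] at hrec
        simp only [List.singleton_append] at hrec
        simp [hab, noAdj, hrec]

theorem hasSevenAltLoop_eq (xs : List Int) :
    ∀ (s : Int) (p : Option Int),
      hasSevenAltLoop xs s p =
        ((match p with | some v => noAdj (v :: xs) | none => noAdj xs) &&
          (s + (xs.count 7 : Int) == 3)) := by
  induction xs with
  | nil =>
    intro s p
    cases p <;> simp [hasSevenAltLoop, noAdj]
  | cons x t ih =>
    intro s p
    have hc : ((if x == 7 then s + 1 else s) + (t.count 7 : Int)) =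
        s + ((x :: t).count 7 : Int) := by
      by_cases h7 : x = 7
      · simp [h7]
        omega
      · simp [h7]
    cases p with
    | none =>
      simp only [hasSevenAltLoop]
      rw [ih, hc]
      simp
    | some v =>
      by_cases hv : v = x
      · simp [hasSevenAltLoop, hv, noAdj]
      · simp only [hasSevenAltLoop, show (some v == some x) = false by simp [hv],
          Bool.false_eq_true, if_false]
        rw [ih, hc]
        simp [noAdj, hv]

-- ===== VERDICT (by name: the statement is the Claim_ definition above) =====
theorem has_seven_spec : Claim_equal_has_seven := by
  intro nums _
  unfold Spec_has_seven has_seven has_seven_alt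
  rw [hasSevenAltLoop_eq nums 0 none, hasSevenScan_eq_noAdj, PySem.List.count_eq]
  by_cases hc : nums.count 7 = 3
  · rw [show (nums.count 7 == 3) = true by simp [hc],
       show ((0 : Int) + (nums.count 7 : Int) == 3) = true by simp [hc]]
    simp
  · rw [show (nums.count 7 == 3) = false by simp [hc],
       show ((0 : Int) + (nums.count 7 : Int) == 3) = false by simp; omega]
    simp
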